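-- pv_equiv track=rewrite | github.com/StreltsovMike/Python_HomeWork3 | Task_5.py | fibanachi
-- ===== SOURCE A (Python) =====
-- def fibanachi(num):
--     fiba = [0, 1]
--     for i in range(num):
--         sum = fiba[len(fiba)-1] + fiba[len(fiba)-2]
--         fiba.append(sum)
--     n =0
--     for i in range(1, len(fiba)):
--         min = fiba[i+n] * ((-1)**n)
--         fiba.insert(0, min)
--         n += 1
--     return(fiba)
-- ===== SOURCE B (Python) =====
-- def fibanachi(num):
--     fib = [0, 1]
--     for _ in range(num):
--         fib.append(fib[-1] + fib[-2])
--     neg = []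
--     higher, lower = fib[1], fib[0]
--     for _ in range(len(fib) - 1):
--         new = higher - lower
--         neg.append(new)
--         higher, lower = lower, new
--     return neg[::-1] + fib
-- ===== Notes on version B (the rewrite author's own statement) =====
-- stated objective: alternative
-- what changed: The negafibonacci prefix is generated by the backward recurrence F(n-1)=F(n+1)-F(n) on a rolling pair with appends and one final reversal, instead of A's per-term sign-power computation with indexed lookups into a list mutated by insert at position zero on every step.
import Mathlib
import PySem

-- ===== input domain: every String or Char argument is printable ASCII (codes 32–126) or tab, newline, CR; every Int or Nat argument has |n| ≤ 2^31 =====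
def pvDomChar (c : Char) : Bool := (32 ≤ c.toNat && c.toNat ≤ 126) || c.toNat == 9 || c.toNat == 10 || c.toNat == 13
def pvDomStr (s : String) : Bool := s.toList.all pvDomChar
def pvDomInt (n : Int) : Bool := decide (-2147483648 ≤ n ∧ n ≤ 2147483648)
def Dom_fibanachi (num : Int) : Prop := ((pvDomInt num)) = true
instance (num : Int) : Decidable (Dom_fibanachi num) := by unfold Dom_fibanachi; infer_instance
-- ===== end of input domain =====

-- B replaces A's (-1)**n-signed indexed lookups with insert(0,...) by the backward
-- recurrence F(n-1) = F(n+1) - F(n) on a rolling pair, appending and reversing once.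

-- ===== PORT A =====
def fibanachi (num : Int) : List Int :=
  let fiba := (PySem.List.pyRange 0 num 1).foldl
    (fun fiba _ =>
      let sum := PySem.List.pyGetD fiba ((fiba.length : Int) - 1) 0 +
                 PySem.List.pyGetD fiba ((fiba.length : Int) - 2) 0
      fiba ++ [sum])
    [0, 1]
  let st := (PySem.List.pyRange 1 (fiba.length : Int) 1).foldl
    (fun (st : List Int × Int) i =>
      let m := PySem.List.pyGetD st.1 (i + st.2) 0 * ((-1 : Int) ^ st.2.toNat)
      (PySem.List.insert st.1 0 m, st.2 + 1))
    (fiba, 0)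
  st.1

-- ===== PORT B =====
def fibanachi_alt (num : Int) : List Int :=
  let fib := (PySem.List.pyRange 0 num 1).foldl
    (fun fib _ => fib ++ [PySem.List.pyGetD fib (-1) 0 + PySem.List.pyGetD fib (-2) 0])
    [0, 1]
  let st := (PySem.List.pyRange 0 ((fib.length : Int) - 1) 1).foldl
    (fun (st : List Int × Int × Int) _ =>
      let nw := st.2.1 - st.2.2
      (st.1 ++ [nw], st.2.2, nw))
    ([], PySem.List.pyGetD fib 1 0, PySem.List.pyGetD fib 0 0)
  (PySem.List.slice? st.1 none none (-1)).getD [] ++ fib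

-- ===== PRECONDITION & SPEC =====
def Spec_fibanachi (num : Int) (out : List Int) : Prop := out = fibanachi_alt num
instance (num : Int) (out : List Int) : Decidable (Spec_fibanachi num out) := by unfold Spec_fibanachi; infer_instance

-- ===== CLAIM (what is proved, stated in full; the proofs are below) =====
def Claim_equal_fibanachi : Prop := ∀ (num : Int), Dom_fibanachi num → Spec_fibanachi num (fibanachi num)

-- ===== LEMMAS AND PROOFS =====

def pvF : Nat → Int
  | 0 => 0
  | 1 => 1
  | n + 2 => pvF n + pvF (n + 1)

def pvNegF (n : Nat) : Int := (-1 : Int) ^ (n + 1) * pvF n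

def pvFibList (k : Nat) : List Int := (List.range (k + 2)).map pvF

theorem pvFibList_length (k : Nat) : (pvFibList k).length = k + 2 := by
  simp [pvFibList]

theorem foldl_const_iterate {α β : Type} (l : List α) (f : β → β) (init : β) :
    l.foldl (fun s _ => f s) init = f^[l.length] init := by
  induction l generalizing init with
  | nil => rfl
  | cons x t ih => simp [List.foldl_cons, ih, Function.iterate_succ_apply]

theorem pvNegF_rec (j : Nat) : pvNegF (j + 2) = pvNegF j - pvNegF (j + 1) := by
  simp only [pvNegF, pvF, pow_succ]
  ring

theorem pvNegF_eq (j : Nat) : pvNegF (j + 1) = pvF (j + 1) * (-1 : Int) ^ j := by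
  simp only [pvNegF, pow_succ]
  ring

theorem pvFibList_succ (k : Nat) :
    pvFibList (k + 1) = pvFibList k ++ [pvF k + pvF (k + 1)] := by
  simp [pvFibList, List.range_succ, pvF]

-- the two forward loops build the same Fibonacci list
theorem stepA_fibList (k : Nat) :
    pvFibList k ++ [PySem.List.pyGetD (pvFibList k) (((pvFibList k).length : Int) - 1) 0 +
                    PySem.List.pyGetD (pvFibList k) (((pvFibList k).length : Int) - 2) 0]
      = pvFibList (k + 1) := by
  have h1 : ((pvFibList k).length : Int) - 1 = ((k + 1 : Nat) : Int) := by
    rw [pvFibList_length]; omega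
  have h2 : ((pvFibList k).length : Int) - 2 = ((k : Nat) : Int) := by
    rw [pvFibList_length]; omega
  rw [h1, h2, PySem.List.pyGetD_natCast, PySem.List.pyGetD_natCast]
  have gA : (pvFibList k).getD (k + 1) 0 = pvF (k + 1) := by simp [pvFibList, List.getD]
  have gB : (pvFibList k).getD k 0 = pvF k := by simp [pvFibList, List.getD]
  rw [gA, gB, pvFibList_succ]
  try rw [add_comm (pvF (k+1))]

theorem stepB_fibList (k : Nat) :
    pvFibList k ++ [PySem.List.pyGetD (pvFibList k) (-1) 0 + PySem.List.pyGetD (pvFibList k) (-2) 0]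
      = pvFibList (k + 1) := by
  have hne : pvFibList k ≠ [] := by
    intro h
    have := pvFibList_length k
    rw [h] at this
    simp at this
  rw [PySem.List.pyGetD_neg_one _ 0 hne]
  rw [PySem.List.pyGetD_neg_ofNat _ 2 0 (by omega) (by rw [pvFibList_length]; omega)]
  have hlast : (pvFibList k).getLast hne = pvF (k + 1) := by
    rw [List.getLast_eq_getElem]
    simp [pvFibList]
  have hpen : ∀ (h : (pvFibList k).length - 2 < (pvFibList k).length),
      (pvFibList k)[(pvFibList k).length - 2]'h = pvF k := by
    intro h
    simp [pvFibList]
  rw [hlast, hpen _, pvFibList_succ]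
  try rw [add_comm (pvF (k+1))]

theorem fwd_iterA (m : Nat) :
    (fun fiba : List Int =>
        fiba ++ [PySem.List.pyGetD fiba ((fiba.length : Int) - 1) 0 +
                 PySem.List.pyGetD fiba ((fiba.length : Int) - 2) 0])^[m] [0, 1]
      = pvFibList m := by
  induction m with
  | zero => simp [pvFibList, List.range_succ]; decide
  | succ k ih =>
    rw [Function.iterate_succ_apply', ih]
    exact stepA_fibList k

theorem fwd_iterB (m : Nat) :
    (fun fib : List Int =>
        fib ++ [PySem.List.pyGetD fib (-1) 0 + PySem.List.pyGetD fib (-2) 0])^[m] [0, 1]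
      = pvFibList m := by
  induction m with
  | zero => simp [pvFibList, List.range_succ]; decide
  | succ k ih =>
    rw [Function.iterate_succ_apply', ih]
    exact stepB_fibList k

theorem fwdA_eq (num : Int) :
    (PySem.List.pyRange 0 num 1).foldl
      (fun fiba _ =>
        let sum := PySem.List.pyGetD fiba ((fiba.length : Int) - 1) 0 +
                   PySem.List.pyGetD fiba ((fiba.length : Int) - 2) 0
        fiba ++ [sum]) [0, 1]
      = pvFibList (PySem.List.pyRange 0 num 1).length := by
  rw [foldl_const_iterate]; exact fwd_iterA _

theorem fwdB_eq (num : Int) :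
    (PySem.List.pyRange 0 num 1).foldl
      (fun fib _ => fib ++ [PySem.List.pyGetD fib (-1) 0 + PySem.List.pyGetD fib (-2) 0]) [0, 1]
      = pvFibList (PySem.List.pyRange 0 num 1).length := by
  rw [foldl_const_iterate]; exact fwd_iterB _

def pvNegPrefix (j : Nat) : List Int := ((List.range j).map (fun t => pvNegF (t + 1))).reverse

-- invariant of A's insert loop
theorem stage2A (k : Nat) (j : Nat) (hj : j ≤ k + 1) :
    (PySem.List.pyRange 1 (1 + (j : Int)) 1).foldl
      (fun (st : List Int × Int) i =>
        let m := PySem.List.pyGetD st.1 (i + st.2) 0 * ((-1 : Int) ^ st.2.toNat)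
        (PySem.List.insert st.1 0 m, st.2 + 1))
      (pvFibList k, 0)
      = (pvNegPrefix j ++ pvFibList k, (j : Int)) := by
  induction j with
  | zero => simp [PySem.List.pyRange_one_eq_nil, pvNegPrefix]
  | succ j ih =>
    have hj' : j ≤ k + 1 := by omega
    rw [show (1 + ((j + 1 : Nat) : Int)) = (1 + (j : Int)) + 1 by push_cast; ring]
    rw [PySem.List.pyRange_one_succ_right (by omega)]
    rw [List.foldl_append, ih hj']
    simp only [List.foldl_cons, List.foldl_nil]
    have hidx : (1 + (j : Int) + (j : Int)) = ((j + (1 + j) : Nat) : Int) := by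
      push_cast; ring
    have hlen : (pvNegPrefix j).length = j := by simp [pvNegPrefix]
    have hget : PySem.List.pyGetD (pvNegPrefix j ++ pvFibList k) (1 + (j : Int) + (j : Int)) 0
        = pvF (j + 1) := by
      rw [hidx, PySem.List.pyGetD_natCast]
      unfold List.getD
      rw [List.getElem?_append_right (by omega)]
      have : j + (1 + j) - (pvNegPrefix j).length = j + 1 := by omega
      rw [this]
      have hjk : j + 1 < k + 2 := by omega
      simp [pvFibList, hjk]
    simp only [hget]
    refine congrArg₂ Prod.mk ?_ ?_
    · rw [show ((j : Int).toNat) = j by omega]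
      rw [← pvNegF_eq j, PySem.List.insert_zero]
      have : pvNegPrefix (j + 1) = pvNegF (j + 1) :: pvNegPrefix j := by
        simp [pvNegPrefix, List.range_succ]
      rw [this]
      rfl
    · push_cast; ring

-- invariant of B's backward-recurrence loop
theorem stage2B (j : Nat) :
    (fun (st : List Int × Int × Int) =>
        let nw := st.2.1 - st.2.2
        (st.1 ++ [nw], st.2.2, nw))^[j] ([], 1, 0)
      = ((List.range j).map (fun t => pvNegF (t + 1)),
         pvNegF (j + 1) + pvNegF j, pvNegF j) := by
  induction j with
  | zero => simp [pvNegF, pvF]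
  | succ j ih =>
    rw [Function.iterate_succ_apply', ih]
    simp only
    refine congrArg₂ _ ?_ (congrArg₂ _ ?_ ?_)
    · simp [List.range_succ]
    · rw [show j + 1 + 1 = j + 2 from rfl, pvNegF_rec]; ring
    · ring

theorem fib_pyGetD_one (k : Nat) : PySem.List.pyGetD (pvFibList k) 1 0 = 1 := by
  rw [show (1 : Int) = ((1 : Nat) : Int) by rfl, PySem.List.pyGetD_natCast]
  simp [pvFibList, List.getD, pvF]

theorem fib_pyGetD_zero (k : Nat) : PySem.List.pyGetD (pvFibList k) 0 0 = 0 := by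
  rw [show (0 : Int) = ((0 : Nat) : Int) by rfl, PySem.List.pyGetD_natCast]
  simp [pvFibList, List.getD, pvF]

-- ===== VERDICT (by name: the statement is the Claim_ definition above) =====
theorem fibanachi_spec : Claim_equal_fibanachi := by
  intro num _
  unfold Spec_fibanachi fibanachi fibanachi_alt
  simp only
  rw [fwdA_eq, fwdB_eq]
  set m := (PySem.List.pyRange 0 num 1).length with hm
  -- A side
  have hlenA : ((pvFibList m).length : Int) = 1 + ((m + 1 : Nat) : Int) := by
    rw [pvFibList_length]; push_cast; ring
  rw [hlenA, stage2A m (m + 1) (by omega)]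
  -- B side
  have hlenB : ((pvFibList m).length : Int) - 1 = ((m + 1 : Nat) : Int) := by
    rw [pvFibList_length]; push_cast; ring
  rw [show (1 : Int) + ((m + 1 : Nat) : Int) - 1 = ((m + 1 : Nat) : Int) by ring,
      foldl_const_iterate]
  rw [fib_pyGetD_one, fib_pyGetD_zero]
  rw [show (PySem.List.pyRange 0 ((m + 1 : Nat) : Int) 1).length = m + 1 by
    rw [PySem.List.length_pyRange_one]; omega]
  rw [stage2B (m + 1)]
  simp only [PySem.List.slice?_none_none_neg_one, Option.getD_some]
  simp [pvNegPrefix]
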